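-- pv_equiv track=rewrite | github.com/scott2000/answerset | src/__init__.py | split_except_for_ranges
-- ===== SOURCE A (Python) =====
-- from typing import Iterator, Optional
--
-- def index_in_any_range(index: int, ranges: list[tuple[int, int]]) -> bool:
--     return any(start <= index < end for start, end in ranges)
--
-- def find_indices(haystack: str, needle: str, ranges: list[tuple[int, int]]) -> Iterator[int]:
--     return (i for i, ch in enumerate(haystack) if ch == needle and not index_in_any_range(i, ranges))
--
-- def split_except_for_ranges(string: str, sep: str, ranges: list[tuple[int, int]]) -> list[str]:
--     sep_indices = list(find_indices(string, sep, ranges))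
--
--     if not sep_indices:
--         return [string]
--
--     parts = []
--     last = 0
--     for i in sep_indices:
--         parts.append(string[last:i])
--         last = i + 1
--
--     parts.append(string[last:])
--     return parts
-- ===== SOURCE B (Python) =====
-- def split_except_for_ranges(string: str, sep: str, ranges: list[tuple[int, int]]) -> list[str]:
--     parts = []
--     current = []
--     for i, ch in enumerate(string):
--         if ch == sep and not any(start <= i < end for start, end in ranges):
--             parts.append(''.join(current))
--             current = []
--         else:
--             current.append(ch)
--     parts.append(''.join(current))
--     return parts
-- ===== Notes on version B (the rewrite author's own statement) =====
-- stated objective: simpler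
-- what changed: A collects all unblocked separator indices first and then slices the string between consecutive indices in a second loop; B is a single left-to-right pass that accumulates the current piece character by character and emits it whenever an unblocked separator is seen, with no index list, no slicing and no special empty case.
import Mathlib
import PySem

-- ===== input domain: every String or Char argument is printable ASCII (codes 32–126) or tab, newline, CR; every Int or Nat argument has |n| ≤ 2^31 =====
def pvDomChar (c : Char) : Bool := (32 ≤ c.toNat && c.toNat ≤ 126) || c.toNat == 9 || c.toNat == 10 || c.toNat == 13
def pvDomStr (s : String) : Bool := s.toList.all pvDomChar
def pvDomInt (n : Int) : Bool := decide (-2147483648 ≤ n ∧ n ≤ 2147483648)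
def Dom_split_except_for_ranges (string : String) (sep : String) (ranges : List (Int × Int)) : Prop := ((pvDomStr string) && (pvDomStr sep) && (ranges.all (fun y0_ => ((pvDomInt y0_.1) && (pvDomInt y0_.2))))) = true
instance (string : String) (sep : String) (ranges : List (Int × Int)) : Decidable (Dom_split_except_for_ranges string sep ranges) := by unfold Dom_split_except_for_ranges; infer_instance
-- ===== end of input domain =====

-- B replaces A's two-phase "collect separator indices, then slice" with a single pass that
-- accumulates the current piece character by character; objective: simpler (no speed claim).


-- ===== PORT A =====
def index_in_any_range (index : Int) (ranges : List (Int × Int)) : Bool :=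
  ranges.any (fun r => decide (r.1 ≤ index ∧ index < r.2))

def find_indices (haystack : String) (needle : String) (ranges : List (Int × Int)) : List Int :=
  (PySem.List.enumerate haystack.toList).filterMap
    (fun p => if String.ofList [p.2] == needle && !(index_in_any_range p.1 ranges) then some p.1 else none)

def split_except_for_ranges (string : String) (sep : String) (ranges : List (Int × Int)) : List String :=
  let sep_indices := find_indices string sep ranges
  if sep_indices = [] then [string]
  else
    let st := sep_indices.foldl
      (fun (st : List String × Int) i => (st.1 ++ [PySem.Str.slice string (some st.2) (some i)], i + 1))
      ([], 0)
    st.1 ++ [PySem.Str.slice string (some st.2) none]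

-- ===== PORT B =====
def split_except_for_ranges_alt (string : String) (sep : String) (ranges : List (Int × Int)) : List String :=
  let st := (PySem.List.enumerate string.toList).foldl
    (fun (st : List String × List Char) p =>
      if String.ofList [p.2] == sep && !(ranges.any (fun r => decide (r.1 ≤ p.1 ∧ p.1 < r.2)))
      then (st.1 ++ [String.ofList st.2], [])
      else (st.1, st.2 ++ [p.2]))
    ([], [])
  st.1 ++ [String.ofList st.2]

-- ===== PRECONDITION & SPEC =====
def Spec_split_except_for_ranges (string : String) (sep : String) (ranges : List (Int × Int)) (out : List String) : Prop := out = split_except_for_ranges_alt string sep ranges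
instance (string : String) (sep : String) (ranges : List (Int × Int)) (out : List String) : Decidable (Spec_split_except_for_ranges string sep ranges out) := by unfold Spec_split_except_for_ranges; infer_instance

-- ===== CLAIM (what is proved, stated in full; the proofs are below) =====
def Claim_equal_split_except_for_ranges : Prop := ∀ (string : String) (sep : String) (ranges : List (Int × Int)), Dom_split_except_for_ranges string sep ranges → Spec_split_except_for_ranges string sep ranges (split_except_for_ranges string sep ranges)

-- ===== LEMMAS AND PROOFS =====

-- the separator test both programs perform at position i on character c
def isSepAt (sep : String) (ranges : List (Int × Int)) (i : Int) (c : Char) : Bool :=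
  String.ofList [c] == sep && !(ranges.any (fun r => decide (r.1 ≤ i ∧ i < r.2)))

-- recursive form of B's single pass
def bRec (sep : String) (ranges : List (Int × Int)) :
    List Char → Int → List String → List Char → List String
  | [], _, parts, cur => parts ++ [String.ofList cur]
  | c :: cs, n, parts, cur =>
    if isSepAt sep ranges n c then bRec sep ranges cs (n + 1) (parts ++ [String.ofList cur]) []
    else bRec sep ranges cs (n + 1) parts (cur ++ [c])

-- recursive form of A's separator-index list on a suffix starting at position n
def idxRec (sep : String) (ranges : List (Int × Int)) : List Char → Int → List Int
  | [], _ => []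
  | c :: cs, n =>
    if isSepAt sep ranges n c then n :: idxRec sep ranges cs (n + 1)
    else idxRec sep ranges cs (n + 1)

-- recursive form of A's slicing loop (over the full character list cs0)
def aRec (cs0 : List Char) : List Int → List String → Int → List String
  | [], parts, last => parts ++ [String.ofList (PySem.List.slice cs0 (some last) none)]
  | i :: is, parts, last =>
    aRec cs0 is (parts ++ [String.ofList (PySem.List.slice cs0 (some last) (some i))]) (i + 1)

lemma find_indices_eq_idxRec (sep : String) (ranges : List (Int × Int)) :
    ∀ (cs : List Char) (n : Int),
      (PySem.List.enumerate cs n).filterMap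
        (fun p => if String.ofList [p.2] == sep && !(index_in_any_range p.1 ranges) then some p.1 else none)
      = idxRec sep ranges cs n := by
  have hfun : (fun p : Int × Char => if String.ofList [p.2] == sep && !(index_in_any_range p.1 ranges) then some p.1 else none)
      = (fun p : Int × Char => if isSepAt sep ranges p.1 p.2 then some p.1 else none) := rfl
  rw [hfun]
  intro cs
  induction cs with
  | nil => intro n; simp [PySem.List.enumerate_nil, idxRec]
  | cons c cs ih =>
    intro n
    rw [PySem.List.enumerate_cons, List.filterMap_cons]
    cases h : isSepAt sep ranges n c <;> simp [h, idxRec, ih]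

lemma foldA_eq_aRec (string : String) :
    ∀ (is : List Int) (parts : List String) (last : Int),
      (let st := is.foldl
          (fun (st : List String × Int) i => (st.1 ++ [PySem.Str.slice string (some st.2) (some i)], i + 1))
          (parts, last);
       st.1 ++ [PySem.Str.slice string (some st.2) none])
      = aRec string.toList is parts last := by
  intro is
  induction is with
  | nil => intro parts last; simp [aRec, PySem.Str.slice, PySem.Chars.slice]
  | cons i is ih =>
    intro parts last
    simp only [List.foldl_cons, aRec]
    rw [← ih]
    rfl

lemma foldB_eq_bRec (sep : String) (ranges : List (Int × Int)) :
    ∀ (cs : List Char) (n : Int) (parts : List String) (cur : List Char),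
      (let st := (PySem.List.enumerate cs n).foldl
          (fun (st : List String × List Char) p =>
            if String.ofList [p.2] == sep && !(ranges.any (fun r => decide (r.1 ≤ p.1 ∧ p.1 < r.2)))
            then (st.1 ++ [String.ofList st.2], [])
            else (st.1, st.2 ++ [p.2]))
          (parts, cur);
       st.1 ++ [String.ofList st.2])
      = bRec sep ranges cs n parts cur := by
  have hfun : (fun (st : List String × List Char) (p : Int × Char) =>
        if String.ofList [p.2] == sep && !(ranges.any (fun r => decide (r.1 ≤ p.1 ∧ p.1 < r.2)))
        then (st.1 ++ [String.ofList st.2], ([] : List Char))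
        else (st.1, st.2 ++ [p.2]))
      = (fun (st : List String × List Char) (p : Int × Char) =>
        if isSepAt sep ranges p.1 p.2
        then (st.1 ++ [String.ofList st.2], ([] : List Char))
        else (st.1, st.2 ++ [p.2])) := rfl
  rw [hfun]
  intro cs
  induction cs with
  | nil => intro n parts cur; simp [PySem.List.enumerate_nil, bRec]
  | cons c cs ih =>
    intro n parts cur
    rw [PySem.List.enumerate_cons]
    cases h : isSepAt sep ranges n c <;> simp only [List.foldl_cons, h, if_pos, if_neg,
      Bool.false_eq_true, not_false_iff, bRec] <;> exact ih (n + 1) _ _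

lemma main_lemma (sep : String) (ranges : List (Int × Int)) (cs0 : List Char) :
    ∀ (cs : List Char) (n last : Nat) (parts : List String),
      cs = cs0.drop n → last ≤ n →
      aRec cs0 (idxRec sep ranges cs (n : Int)) parts (last : Int)
        = bRec sep ranges cs (n : Int) parts ((cs0.drop last).take (n - last)) := by
  intro cs
  induction cs with
  | nil =>
    intro n last parts hdrop hle
    have hlen : cs0.length ≤ n := by
      by_contra hlt
      push Not at hlt
      have := List.drop_eq_nil_iff.mp hdrop.symm
      omega
    simp only [idxRec, aRec, bRec]
    rw [PySem.List.slice_from_natCast, List.take_of_length_le (by simp; omega)]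
  | cons c cs ih =>
    intro n last parts hdrop hle
    have hlt : n < cs0.length := by
      by_contra hge
      push Not at hge
      rw [List.drop_eq_nil_iff.mpr hge] at hdrop
      simp at hdrop
    have hget : cs0[n]? = some c := by
      have : (cs0.drop n)[0]? = some c := by rw [← hdrop]; rfl
      rwa [List.getElem?_drop, Nat.add_zero] at this
    have hdrop' : cs = cs0.drop (n + 1) := by
      have : (cs0.drop n).tail = cs0.drop (n + 1) := by
        rw [List.tail_drop]
      rw [← this, ← hdrop]
      rfl
    have hcast : (n : Int) + 1 = ((n + 1 : Nat) : Int) := by push_cast; ring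
    by_cases h : isSepAt sep ranges (n : Int) c
    · simp only [idxRec, h, if_pos, aRec, bRec]
      rw [PySem.List.slice_natCast, hcast, ih (n + 1) (n + 1) _ hdrop' (le_refl _)]
      simp
    · simp only [idxRec, h, if_neg, bRec, Bool.not_eq_true]
      rw [hcast, ih (n + 1) last _ hdrop' (by omega)]
      have htake : (cs0.drop last).take (n - last) ++ [c] = (cs0.drop last).take (n + 1 - last) := by
        have h1 : n + 1 - last = (n - last) + 1 := by omega
        rw [h1, List.take_add_one, List.getElem?_drop]
        have h2 : last + (n - last) = n := by omega
        rw [h2, hget]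
        rfl
      rw [htake]

lemma aRec_empty (cs0 : List Char) (parts : List String) :
    aRec cs0 [] parts 0 = parts ++ [String.ofList cs0] := by
  simp [aRec, PySem.List.slice_from]

-- ===== VERDICT (by name: the statement is the Claim_ definition above) =====
theorem split_except_for_ranges_spec : Claim_equal_split_except_for_ranges := by
  intro string sep ranges _
  unfold Spec_split_except_for_ranges split_except_for_ranges split_except_for_ranges_alt find_indices
  rw [find_indices_eq_idxRec]
  have hB := foldB_eq_bRec sep ranges string.toList 0 [] []
  simp only at hB
  rw [hB]
  have hmain := main_lemma sep ranges string.toList string.toList 0 0 [] (by simp) (le_refl 0)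
  simp only [Nat.cast_zero, Nat.sub_zero, List.drop_zero, List.take_zero] at hmain
  by_cases hnil : idxRec sep ranges string.toList 0 = []
  · rw [hnil, if_pos rfl]
    rw [hnil] at hmain
    rw [← hmain, aRec_empty, String.ofList_toList]
    simp
  · rw [if_neg hnil]
    have hA := foldA_eq_aRec string (idxRec sep ranges string.toList 0) [] 0
    simp only at hA
    rw [hA, hmain]
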